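-- pv_equiv track=rewrite | github.com/Oleksandr190378/SoftServe_Internship | ai-ml-course-assistant/ingest/extract_image_context.py | _extract_sentence_from_start
-- ===== SOURCE A (Python) =====
-- SENTENCE_END_MARKERS = ['. ', '.\n', '! ', '!\n', '? ', '?\n']
--
-- def _extract_sentence_from_start(text: str, max_chars: int) -> str:
--     """
--     STAGE 3: SRP - extract sentence from start logic.
--
--     Extract sentence from start of text up to max_chars.
--
--     Args:
--         text: Source text
--         max_chars: Maximum characters to consider
--
--     Returns:
--         Extracted text starting with sentence boundary
--     """
--     if not text or max_chars < 1:
--         return ""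
--
--     chunk = text[:max_chars] if len(text) > max_chars else text
--
--     first_boundary = len(chunk)
--     for end_marker in SENTENCE_END_MARKERS:
--         idx = chunk.find(end_marker)
--         if idx != -1 and idx < first_boundary:
--             first_boundary = idx + 1  # Include the period
--
--     return chunk[:first_boundary].strip()
-- ===== SOURCE B (Python) =====
-- def _extract_sentence_from_start(text: str, max_chars: int) -> str:
--     """Single left-to-right scan for the earliest sentence boundary
--     instead of six repeated str.find passes."""
--     if not text or max_chars < 1:
--         return ""
--     chunk = text[:max_chars]
--     for i in range(len(chunk) - 1):
--         if chunk[i] in '.!?' and chunk[i + 1] in ' \n':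
--             return chunk[:i + 1].strip()
--     return chunk.strip()
-- ===== Notes on version B (the rewrite author's own statement) =====
-- stated objective: idiomatic
-- what changed: Replaced the six repeated str.find scans (one per sentence-end marker, keeping the minimum index) by a single left-to-right scan over adjacent character pairs that returns at the first '.'/'!'/'?' followed by ' ' or '\n', and folded the length test into a plain clamped slice text[:max_chars].
import Mathlib
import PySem

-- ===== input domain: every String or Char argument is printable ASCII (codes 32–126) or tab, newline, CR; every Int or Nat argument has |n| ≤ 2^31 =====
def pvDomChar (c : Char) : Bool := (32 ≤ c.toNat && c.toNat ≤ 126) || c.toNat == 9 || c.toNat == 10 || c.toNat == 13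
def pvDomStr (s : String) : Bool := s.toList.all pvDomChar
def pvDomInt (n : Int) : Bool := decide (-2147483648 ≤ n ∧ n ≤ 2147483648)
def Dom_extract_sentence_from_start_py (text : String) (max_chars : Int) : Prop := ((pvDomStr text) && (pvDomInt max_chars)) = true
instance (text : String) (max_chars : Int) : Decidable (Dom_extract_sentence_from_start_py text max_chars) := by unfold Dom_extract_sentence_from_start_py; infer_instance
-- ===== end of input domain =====

-- B replaces A's six repeated str.find scans by one left-to-right scan for the earliest
-- boundary (objective: alternative single-pass formulation; same asymptotic cost).

-- ===== PORT A =====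
-- SENTENCE_END_MARKERS
def pvMarkers : List (List Char) :=
  [['.', ' '], ['.', '\n'], ['!', ' '], ['!', '\n'], ['?', ' '], ['?', '\n']]

def extract_sentence_from_start_py (text : String) (max_chars : Int) : String :=
  if text = "" ∨ max_chars < 1 then ""
  else
    let t := text.toList
    let chunk := if (t.length : Int) > max_chars then PySem.List.slice t none (some max_chars) else t
    let fb := pvMarkers.foldl (fun fb m =>
        let idx := PySem.Chars.find chunk m
        if idx ≠ -1 ∧ idx < fb then idx + 1 else fb) (chunk.length : Int)
    String.ofList (PySem.Chars.strip (PySem.List.slice chunk none (some fb)))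

-- ===== PORT B =====
-- the 'for i in range(len(chunk)-1)' scan with its early return; carries chunk for the final slice
def pvScanB : List Char → List Char → Int → String
  | c :: d :: rest, chunk, i =>
    if (c = '.' ∨ c = '!' ∨ c = '?') ∧ (d = ' ' ∨ d = '\n') then
      String.ofList (PySem.Chars.strip (PySem.List.slice chunk none (some (i + 1))))
    else pvScanB (d :: rest) chunk (i + 1)
  | _, chunk, _ => String.ofList (PySem.Chars.strip chunk)

def extract_sentence_from_start_py_alt (text : String) (max_chars : Int) : String :=
  if text = "" ∨ max_chars < 1 then ""
  else
    let chunk := PySem.List.slice text.toList none (some max_chars)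
    pvScanB chunk chunk 0

-- ===== PRECONDITION & SPEC =====
def Spec_extract_sentence_from_start_py (text : String) (max_chars : Int) (out : String) : Prop := out = extract_sentence_from_start_py_alt text max_chars
instance (text : String) (max_chars : Int) (out : String) : Decidable (Spec_extract_sentence_from_start_py text max_chars out) := by unfold Spec_extract_sentence_from_start_py; infer_instance

-- ===== CLAIM (what is proved, stated in full; the proofs are below) =====
def Claim_equal_extract_sentence_from_start_py : Prop := ∀ (text : String) (max_chars : Int), Dom_extract_sentence_from_start_py text max_chars → Spec_extract_sentence_from_start_py text max_chars (extract_sentence_from_start_py text max_chars)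

-- ===== LEMMAS AND PROOFS =====

-- index of the first adjacent pair (./!/? followed by space/newline), proof-side only
def pvFirst : List Char → Option Nat
  | c :: d :: rest =>
    if (c = '.' ∨ c = '!' ∨ c = '?') ∧ (d = ' ' ∨ d = '\n') then some 0
    else (pvFirst (d :: rest)).map (· + 1)
  | _ => none

def pvMatchAt (l : List Char) (j : Nat) : Prop := ∃ m ∈ pvMarkers, m <+: l.drop j

lemma pvMatchAt_zero_iff (l : List Char) :
    pvMatchAt l 0 ↔ ∃ c d rest, l = c :: d :: rest ∧ (c = '.' ∨ c = '!' ∨ c = '?') ∧ (d = ' ' ∨ d = '\n') := by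
  unfold pvMatchAt pvMarkers
  constructor
  · rintro ⟨m, hm, hpre⟩
    simp only [List.mem_cons, List.not_mem_nil, or_false] at hm
    rcases hm with h|h|h|h|h|h <;> subst h <;>
      rcases hpre with ⟨t, ht⟩ <;> exact ⟨_, _, t, by simpa using ht.symm, by simp, by simp⟩
  · rintro ⟨c, d, rest, rfl, hc, hd⟩
    refine ⟨[c, d], ?_, ⟨rest, rfl⟩⟩
    rcases hc with rfl|rfl|rfl <;> rcases hd with rfl|rfl <;> simp

lemma pvMatchAt_succ (c : Char) (l : List Char) (j : Nat) :
    pvMatchAt (c :: l) (j + 1) ↔ pvMatchAt l j := by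
  unfold pvMatchAt; simp

lemma pvMarker_length (m : List Char) (hm : m ∈ pvMarkers) : m.length = 2 := by
  fin_cases hm <;> rfl

lemma pvMatchAt_len (l : List Char) (j : Nat) (h : pvMatchAt l j) : j + 2 ≤ l.length := by
  obtain ⟨m, hm, hpre⟩ := h
  have h1 := hpre.length_le
  have h2 := pvMarker_length m hm
  simp [List.length_drop] at h1
  omega

lemma pvFirst_none (l : List Char) (h : pvFirst l = none) : ∀ j, ¬ pvMatchAt l j := by
  induction l using pvFirst.induct with
  | case1 c d rest hcond =>
    simp [pvFirst, hcond] at h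
  | case2 c d rest hcond ih =>
    rw [pvFirst, if_neg hcond] at h
    simp only [Option.map_eq_none_iff] at h
    intro j hj
    cases j with
    | zero =>
      rw [pvMatchAt_zero_iff] at hj
      obtain ⟨c', d', rest', heq, hc, hd⟩ := hj
      cases heq
      exact hcond ⟨hc, hd⟩
    | succ j =>
      rw [pvMatchAt_succ] at hj
      exact ih h j hj
  | case3 l hshape =>
    intro j hj
    have := pvMatchAt_len l j hj
    match l, hshape with
    | [], _ => simp at this
    | [c], _ => simp at this
    | c :: d :: rest, hshape => exact absurd rfl (hshape c d rest)

lemma pvFirst_some (l : List Char) (j : Nat) (h : pvFirst l = some j) :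
    pvMatchAt l j ∧ ∀ i < j, ¬ pvMatchAt l i := by
  induction l using pvFirst.induct generalizing j with
  | case1 c d rest hcond =>
    rw [pvFirst, if_pos hcond] at h
    cases h
    constructor
    · exact (pvMatchAt_zero_iff _).2 ⟨c, d, rest, rfl, hcond.1, hcond.2⟩
    · omega
  | case2 c d rest hcond ih =>
    rw [pvFirst, if_neg hcond] at h
    simp only [Option.map_eq_some_iff] at h
    obtain ⟨j', hj', rfl⟩ := h
    obtain ⟨hma, hmin⟩ := ih j' hj'
    refine ⟨(pvMatchAt_succ c _ j').2 hma, ?_⟩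
    intro i hi
    cases i with
    | zero =>
      rw [pvMatchAt_zero_iff]
      rintro ⟨c', d', rest', heq, hc, hd⟩
      cases heq
      exact hcond ⟨hc, hd⟩
    | succ i =>
      rw [pvMatchAt_succ]
      exact hmin i (by omega)
  | case3 l hshape =>
    match l, hshape with
    | [], _ => simp [pvFirst] at h
    | [c], _ => simp [pvFirst] at h
    | c :: d :: rest, hshape => exact absurd rfl (hshape c d rest)

-- B-side characterisation
lemma pvScanB_eq (l chunk : List Char) (i : Int) :
    pvScanB l chunk i =
      match pvFirst l with
      | some j => String.ofList (PySem.Chars.strip (PySem.List.slice chunk none (some (i + j + 1))))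
      | none => String.ofList (PySem.Chars.strip chunk) := by
  induction l using pvFirst.induct generalizing i with
  | case1 c d rest hcond =>
    rw [pvScanB, if_pos hcond, pvFirst, if_pos hcond]
    norm_num
  | case2 c d rest hcond ih =>
    rw [pvScanB, if_neg hcond, pvFirst, if_neg hcond, ih]
    rcases hfd : pvFirst (d :: rest) with _ | j <;> simp only [Option.map_none, Option.map_some]
    have : i + 1 + (j : Int) + 1 = i + ((j : Nat) + 1 : Nat) + 1 := by push_cast; ring
    rw [this]
  | case3 l hshape =>
    match l, hshape with
    | [], _ => rfl
    | [c], _ => rfl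
    | c :: d :: rest, hshape => exact absurd rfl (hshape c d rest)

-- A's fold step, with the let inlined (definitionally equal to the port's lambda)
def pvStep (l : List Char) (fb : Int) (m : List Char) : Int :=
  if PySem.Chars.find l m ≠ -1 ∧ PySem.Chars.find l m < fb then PySem.Chars.find l m + 1 else fb

lemma pvFold_none (l : List Char) (ms : List (List Char)) (acc : Int)
    (h : ∀ m ∈ ms, PySem.Chars.find l m = -1) : ms.foldl (pvStep l) acc = acc := by
  induction ms generalizing acc with
  | nil => rfl
  | cons m ms ih =>
    rw [List.foldl_cons, pvStep, if_neg (by simp [h m (by simp)])]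
    exact ih acc (fun m hm => h m (List.mem_cons_of_mem _ hm))

lemma pvFold_keep (l : List Char) (j0 : Nat) (ms : List (List Char))
    (hge : ∀ m ∈ ms, PySem.Chars.find l m = -1 ∨ (j0 : Int) ≤ PySem.Chars.find l m) :
    ms.foldl (pvStep l) ((j0 : Int) + 1) = (j0 : Int) + 1 := by
  induction ms with
  | nil => rfl
  | cons m ms ih =>
    rw [List.foldl_cons]
    have hstep : pvStep l ((j0 : Int) + 1) m = (j0 : Int) + 1 := by
      rcases hge m (by simp) with h | h
      · rw [pvStep, if_neg (by simp [h])]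
      · rw [pvStep]
        split_ifs with hc
        · omega
        · rfl
    rw [hstep]
    exact ih (fun m hm => hge m (by simp [hm]))

lemma pvFold_hit (l : List Char) (j0 : Nat) (ms : List (List Char)) (acc : Int)
    (hacc : (j0 : Int) + 1 ≤ acc)
    (hex : ∃ m ∈ ms, PySem.Chars.find l m = (j0 : Int))
    (hge : ∀ m ∈ ms, PySem.Chars.find l m = -1 ∨ (j0 : Int) ≤ PySem.Chars.find l m) :
    ms.foldl (pvStep l) acc = (j0 : Int) + 1 := by
  induction ms generalizing acc with
  | nil => simp at hex
  | cons m ms ih =>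
    rw [List.foldl_cons]
    by_cases hm0 : PySem.Chars.find l m = (j0 : Int)
    · have hstep : pvStep l acc m = (j0 : Int) + 1 := by
        rw [pvStep, if_pos (by constructor <;> omega), hm0]
      rw [hstep]
      exact pvFold_keep l j0 ms (fun m hm => hge m (by simp [hm]))
    · have hex' : ∃ m ∈ ms, PySem.Chars.find l m = (j0 : Int) := by
        rcases hex with ⟨m', hm', hf⟩
        rcases List.mem_cons.1 hm' with rfl | hm'
        · exact absurd hf hm0
        · exact ⟨m', hm', hf⟩
      have hacc' : (j0 : Int) + 1 ≤ pvStep l acc m := by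
        rcases hge m (by simp) with h | h
        · rw [pvStep, if_neg (by simp [h])]; exact hacc
        · rw [pvStep]; split_ifs with hc <;> omega
      exact ih _ hacc' hex' (fun m hm => hge m (by simp [hm]))

-- A-side fold characterisation
lemma pvFold_eq (l : List Char) :
    pvMarkers.foldl (fun fb m =>
        let idx := PySem.Chars.find l m
        if idx ≠ -1 ∧ idx < fb then idx + 1 else fb) (l.length : Int) =
      match pvFirst l with
      | some j => (j : Int) + 1
      | none => (l.length : Int) := by
  have hstep : ∀ (init : Int), pvMarkers.foldl (fun fb m =>
        let idx := PySem.Chars.find l m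
        if idx ≠ -1 ∧ idx < fb then idx + 1 else fb) init = pvMarkers.foldl (pvStep l) init := by
    intro init; rfl
  rw [hstep]
  rcases hfd : pvFirst l with _ | j
  · have hnone := pvFirst_none l hfd
    apply pvFold_none
    intro m hm
    rw [PySem.Chars.find_eq_neg_one_iff]
    intro hinf
    obtain ⟨j, hj⟩ := (PySem.Chars.exists_prefix_drop_iff_isIn m l).2
      ((PySem.Chars.isIn_iff_infix m l).2 hinf)
    exact hnone j ⟨m, hm, hj⟩
  · obtain ⟨hma, hmin⟩ := pvFirst_some l j hfd
    have hge : ∀ m ∈ pvMarkers, PySem.Chars.find l m = -1 ∨ (j : Int) ≤ PySem.Chars.find l m := by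
      intro m hm
      by_cases hne : PySem.Chars.find l m = -1
      · exact Or.inl hne
      · right
        have h0 : 0 ≤ PySem.Chars.find l m := by
          have := PySem.Chars.neg_one_le_find l m; omega
        obtain ⟨hpre, _⟩ := PySem.Chars.find_spec (s := l) (sub := m) h0
        have hmA : pvMatchAt l (PySem.Chars.find l m).toNat := ⟨m, hm, hpre⟩
        by_contra hlt
        exact hmin _ (by omega) hmA
    obtain ⟨m0, hm0, hpre0⟩ := hma
    have hfind0 : PySem.Chars.find l m0 = (j : Int) := by
      have hinf : PySem.Chars.isIn m0 l = true :=
        (PySem.Chars.exists_prefix_drop_iff_isIn m0 l).1 ⟨j, hpre0⟩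
      have hne : PySem.Chars.find l m0 ≠ -1 :=
        (PySem.Chars.find_ne_neg_one_iff l m0).2 ((PySem.Chars.isIn_iff_infix m0 l).1 hinf)
      have h0 : 0 ≤ PySem.Chars.find l m0 := by
        have := PySem.Chars.neg_one_le_find l m0; omega
      obtain ⟨_, hfmin⟩ := PySem.Chars.find_spec (s := l) (sub := m0) h0
      have hle : PySem.Chars.find l m0 ≤ (j : Int) := by
        by_contra hgt
        exact hfmin j (by omega) hpre0
      rcases hge m0 hm0 with h | h
      · exact absurd h hne
      · omega
    have hlen : (j : Int) + 1 ≤ (l.length : Int) := by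
      have := pvMatchAt_len l j ⟨m0, hm0, hpre0⟩
      omega
    exact pvFold_hit l j pvMarkers _ hlen ⟨m0, hm0, hfind0⟩ hge

-- ===== VERDICT (by name: the statement is the Claim_ definition above) =====
theorem extract_sentence_from_start_py_spec : Claim_equal_extract_sentence_from_start_py := by
  intro text max_chars _
  unfold Spec_extract_sentence_from_start_py extract_sentence_from_start_py extract_sentence_from_start_py_alt
  by_cases hguard : text = "" ∨ max_chars < 1
  · rw [if_pos hguard, if_pos hguard]
  · rw [if_neg hguard, if_neg hguard]
    dsimp only
    have hmc : 0 ≤ max_chars := by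
      rcases not_or.1 hguard with ⟨_, h⟩; omega
    have hslice : PySem.List.slice text.toList none (some max_chars) = text.toList.take max_chars.toNat :=
      PySem.List.slice_to text.toList hmc
    have hchunk :
        (if (text.toList.length : Int) > max_chars
          then PySem.List.slice text.toList none (some max_chars) else text.toList) =
        PySem.List.slice text.toList none (some max_chars) := by
      split_ifs with h
      · rfl
      · rw [hslice, List.take_of_length_le (by omega)]
    rw [hchunk]
    set chunk := PySem.List.slice text.toList none (some max_chars) with hc
    rw [pvFold_eq chunk, pvScanB_eq chunk chunk 0]
    rcases hfd : pvFirst chunk with _ | j <;> simp only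
    · rw [PySem.List.slice_to chunk (by positivity)]
      simp
    · norm_num
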